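-- pv_equiv track=rewrite | github.com/Rororo098/Xplane-Dataref-Bridge | core/dataref_manager.py | _generate_element_indices
-- ===== SOURCE A (Python) =====
-- def _generate_element_indices(dimensions: list[int]) -> list[str]:
--     """
--     Generate all possible index combinations for multidimensional arrays.
--
--     Examples:
--     - [8] -> ["[0]", "[1]", ..., "[7]"]
--     - [2, 3] -> ["[0][0]", "[0][1]", "[0][2]", "[1][0]", "[1][1]", "[1][2]"]
--     - [2, 3, 4] -> ["[0][0][0]", "[0][0][1]", ..., "[1][2][3]"]
--     """
--     if not dimensions:
--         return []
--
--     # Generate all combinations of indices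
--     combinations = [[]]
--
--     for dim_size in dimensions:
--         new_combinations = []
--         for combo in combinations:
--             for i in range(dim_size):
--                 new_combinations.append(combo + [i])
--         combinations = new_combinations
--
--     # Convert to string format like "[0][1][2]"
--     result = []
--     for combo in combinations:
--         index_str = "".join([f"[{idx}]" for idx in combo])
--         result.append(index_str)
--
--     return result
-- ===== SOURCE B (Python) =====
-- def _generate_element_indices(dimensions: list[int]) -> list[str]:
--     if not dimensions:
--         return []
--
--     def rec(i: int) -> list[str]:
--         if i == len(dimensions):
--             return [""]
--         return [f"[{k}]" + tail for k in range(dimensions[i]) for tail in rec(i + 1)]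
--
--     return rec(0)
-- ===== Notes on version B (the rewrite author's own statement) =====
-- stated objective: simpler
-- what changed: Replaces the iterative prefix-growing list-of-index-lists construction plus a second formatting pass with a single recursion over the dimension list that builds the bracketed strings directly.
import Mathlib
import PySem

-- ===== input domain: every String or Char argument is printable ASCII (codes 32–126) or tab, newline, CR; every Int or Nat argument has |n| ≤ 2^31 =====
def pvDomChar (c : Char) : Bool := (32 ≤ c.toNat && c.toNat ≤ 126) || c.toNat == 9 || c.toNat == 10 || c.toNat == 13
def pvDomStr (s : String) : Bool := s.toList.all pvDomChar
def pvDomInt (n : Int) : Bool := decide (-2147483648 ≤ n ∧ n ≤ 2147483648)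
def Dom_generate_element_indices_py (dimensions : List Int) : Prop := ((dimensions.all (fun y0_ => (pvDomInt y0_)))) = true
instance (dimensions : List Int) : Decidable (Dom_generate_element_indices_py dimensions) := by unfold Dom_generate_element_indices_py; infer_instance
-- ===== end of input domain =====

-- B is a simpler decomposition of the same task: one recursion over the dimension list that
-- builds the bracketed strings directly, instead of growing index-list prefixes and then
-- reformatting them in a second pass. Return values agree everywhere; no argument is mutated.

-- ===== PORT A =====
-- f"[{idx}]" as chars (exact: PySem.Int.toChars is str(idx))
def pvBracket (idx : Int) : List Char := '[' :: PySem.Int.toChars idx ++ [']']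

-- "".join([f"[{idx}]" for idx in combo])
def pvFmtA (combo : List Int) : List Char := (combo.map pvBracket).flatten

def generate_element_indices_py (dimensions : List Int) : List String :=
  if dimensions = [] then []
  else
    -- combinations = [[]]; for dim_size in dimensions: … (inner appends combo + [i])
    let combinations := dimensions.foldl
      (fun combinations dim_size =>
        combinations.foldl
          (fun new_combinations combo =>
            (PySem.List.pyRange 0 dim_size 1).foldl
              (fun new_combinations i => new_combinations ++ [combo ++ [i]])
              new_combinations)
          [])
      [[]]
    -- result loop: result.append(index_str)
    combinations.foldl (fun result combo => result ++ [String.ofList (pvFmtA combo)]) []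

-- ===== PORT B =====
-- rec(i) from Source B, transcribed as recursion on the remaining suffix of dimensions
def pvRecB : List Int → List (List Char)
  | [] => [[]]
  | d :: rest =>
      (PySem.List.pyRange 0 d 1).flatMap
        (fun k => (pvRecB rest).map (fun tail => pvBracket k ++ tail))

def generate_element_indices_py_alt (dimensions : List Int) : List String :=
  if dimensions = [] then [] else (pvRecB dimensions).map String.ofList

-- ===== PRECONDITION & SPEC =====
def Spec_generate_element_indices_py (dimensions : List Int) (out : List String) : Prop := out = generate_element_indices_py_alt dimensions
instance (dimensions : List Int) (out : List String) : Decidable (Spec_generate_element_indices_py dimensions out) := by unfold Spec_generate_element_indices_py; infer_instance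

-- ===== CLAIM (what is proved, stated in full; the proofs are below) =====
def Claim_equal_generate_element_indices_py : Prop := ∀ (dimensions : List Int), Dom_generate_element_indices_py dimensions → Spec_generate_element_indices_py dimensions (generate_element_indices_py dimensions)

-- ===== LEMMAS AND PROOFS =====

-- one step of A's outer loop, as a flatMap
lemma pvStepA (cs : List (List Int)) (d : Int) :
    cs.foldl
      (fun new_combinations combo =>
        (PySem.List.pyRange 0 d 1).foldl
          (fun new_combinations i => new_combinations ++ [combo ++ [i]])
          new_combinations)
      [] =
    cs.flatMap (fun combo => (PySem.List.pyRange 0 d 1).map (fun i => combo ++ [i])) := by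
  have h : ∀ (combo : List Int) (acc : List (List Int)),
      (PySem.List.pyRange 0 d 1).foldl
        (fun new_combinations i => new_combinations ++ [combo ++ [i]]) acc =
      acc ++ (PySem.List.pyRange 0 d 1).map (fun i => combo ++ [i]) := fun combo acc =>
    PySem.List.foldl_append_singleton_eq_map ..
  simp only [h]
  exact PySem.List.foldl_append_eq_flatMap _ _ _

-- invariant: formatting A's prefix-grown combinations equals prefixing B's suffix strings
lemma pvMain (dims : List Int) (cs : List (List Int)) :
    (dims.foldl
      (fun combinations dim_size =>
        combinations.foldl
          (fun new_combinations combo =>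
            (PySem.List.pyRange 0 dim_size 1).foldl
              (fun new_combinations i => new_combinations ++ [combo ++ [i]])
              new_combinations)
          [])
      cs).map pvFmtA =
    cs.flatMap (fun c => (pvRecB dims).map (fun t => pvFmtA c ++ t)) := by
  induction dims generalizing cs with
  | nil =>
      simp [pvRecB, List.flatMap]
      induction cs with
      | nil => rfl
      | cons c cs ihc => simp [ihc]
  | cons d rest ih =>
      rw [List.foldl_cons, pvStepA, ih]
      simp only [pvRecB, List.flatMap_assoc, List.flatMap_map, List.map_flatMap,
        List.map_map]
      refine congrFun (congrArg _ (funext fun c => ?_)) cs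
      refine congrFun (congrArg _ (funext fun k => ?_)) _
      refine congrFun (congrArg _ (funext fun t => ?_)) _
      simp [pvFmtA, List.append_assoc]

-- ===== VERDICT (by name: the statement is the Claim_ definition above) =====
theorem generate_element_indices_py_spec : Claim_equal_generate_element_indices_py := by
  intro dims _
  unfold Spec_generate_element_indices_py generate_element_indices_py generate_element_indices_py_alt
  by_cases h : dims = []
  · simp [h]
  · simp only [h, if_false]
    rw [PySem.List.foldl_append_singleton_eq_map]
    have := pvMain dims [[]]
    simp only [List.flatMap_cons, List.flatMap_nil, List.append_nil] at this
    simp only [pvFmtA, List.map_nil, List.flatten_nil, List.nil_append, List.map_id'] at this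
    rw [show (fun combo => String.ofList (pvFmtA combo)) = String.ofList ∘ pvFmtA from rfl,
        ← List.map_map, this]
    simp
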